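-- pv_equiv track=rewrite | github.com/pekoto/python-data-structures | problems/modified_binary_search.py | _binary_search_bitonic
-- ===== SOURCE A (Python) =====
-- from typing import List
--
-- def _binary_search_bitonic(nums: List[int], key: int, left_start: int, right_start: int, ascending: bool) -> int:
--     """Helper function."""
--     left = left_start
--     right = right_start
--
--     while left <= right:
--         mid = (left + right) // 2
--
--         if nums[mid] == key:
--             return mid
--         elif key > nums[mid]:
--             if ascending:
--                 left = mid+1
--             else:
--                 right = mid-1
--         else:
--             if ascending:
--                 right = mid-1
--             else:
--                 left = mid+1
--
--     return -1
-- ===== SOURCE B (Python) =====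
-- def _binary_search_bitonic(nums, key, left_start, right_start, ascending):
--     # Recursive divide-and-conquer; descending order is reduced to ascending
--     # by negating both the elements and the key, removing the direction branches.
--     s = 1 if ascending else -1
--     t = key * s
--
--     def rec(lo, hi):
--         if lo > hi:
--             return -1
--         mid = (lo + hi) // 2
--         v = nums[mid] * s
--         if v == t:
--             return mid
--         if t > v:
--             return rec(mid + 1, hi)
--         return rec(lo, mid - 1)
--
--     return rec(left_start, right_start)
-- ===== Notes on version B (the rewrite author's own statement) =====
-- stated objective: alternative
-- what changed: Iterative loop with per-step ascending/descending branches replaced by a recursive divide-and-conquer helper that normalises the direction once by negating elements and key, so the recursion has a single comparison and no direction branches.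
-- outside the precondition, e.g. on _binary_search_bitonic([0, 1, 2, 3, 4], 4, 0, 8, True): A returns 4, B returns 4
import Mathlib
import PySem

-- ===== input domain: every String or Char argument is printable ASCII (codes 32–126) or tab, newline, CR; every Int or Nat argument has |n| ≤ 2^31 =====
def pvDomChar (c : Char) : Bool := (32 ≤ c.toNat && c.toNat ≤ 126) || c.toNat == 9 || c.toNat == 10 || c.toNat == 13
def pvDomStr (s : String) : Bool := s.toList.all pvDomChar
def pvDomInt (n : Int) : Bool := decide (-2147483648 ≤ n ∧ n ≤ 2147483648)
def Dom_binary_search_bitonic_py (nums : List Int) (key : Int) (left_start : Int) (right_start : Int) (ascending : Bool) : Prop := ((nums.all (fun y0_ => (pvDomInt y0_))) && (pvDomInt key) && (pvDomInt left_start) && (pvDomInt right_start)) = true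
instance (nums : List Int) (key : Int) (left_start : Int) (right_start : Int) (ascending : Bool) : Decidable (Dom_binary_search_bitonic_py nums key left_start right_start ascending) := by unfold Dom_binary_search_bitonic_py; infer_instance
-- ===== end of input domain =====

-- B replaces A's iterative loop (with ascending/descending branches at every step) by a
-- recursive divide-and-conquer helper that normalises the direction once by negating
-- elements and key; same cost, proved equal on Pre_ (objective: alternative).

-- midpoint bounds, used by both ports' termination proofs
theorem pvMidBounds (lo hi : Int) (h : lo ≤ hi) :
    lo ≤ PySem.Int.floordiv (lo + hi) 2 ∧ PySem.Int.floordiv (lo + hi) 2 ≤ hi :=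
  PySem.Int.floordiv_two_mid_bounds h

-- ===== PORT A =====
-- A's while-loop over the state (left, right), step for step.
def bsLoopA (nums : List Int) (key : Int) (ascending : Bool) (left right : Int) : Int :=
  if h : left ≤ right then
    let mid := PySem.Int.floordiv (left + right) 2
    match PySem.List.pyGet? nums mid with
    | none => -2  -- IndexError in Python; excluded by Pre_
    | some v =>
      if v = key then mid
      else if key > v then
        if ascending then bsLoopA nums key ascending (mid + 1) right
        else bsLoopA nums key ascending left (mid - 1)
      else
        if ascending then bsLoopA nums key ascending left (mid - 1)
        else bsLoopA nums key ascending (mid + 1) right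
  else -1
termination_by (right - left + 1).toNat
decreasing_by
  all_goals (have := pvMidBounds left right h; omega)

def binary_search_bitonic_py (nums : List Int) (key : Int) (left_start : Int) (right_start : Int) (ascending : Bool) : Int :=
  bsLoopA nums key ascending left_start right_start

-- ===== PORT B =====
-- B's recursive helper: one comparison against the sign-normalised target t = key * s.
def bsRecB (nums : List Int) (t : Int) (s : Int) (lo hi : Int) : Int :=
  if h : lo > hi then -1
  else
    let mid := PySem.Int.floordiv (lo + hi) 2
    match PySem.List.pyGet? nums mid with
    | none => -2  -- IndexError in Python; excluded by Pre_
    | some v =>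
      if v * s = t then mid
      else if t > v * s then bsRecB nums t s (mid + 1) hi
      else bsRecB nums t s lo (mid - 1)
termination_by (hi - lo + 1).toNat
decreasing_by
  all_goals (have := pvMidBounds lo hi (by omega); omega)

def binary_search_bitonic_py_alt (nums : List Int) (key : Int) (left_start : Int) (right_start : Int) (ascending : Bool) : Int :=
  let s : Int := if ascending then 1 else -1
  bsRecB nums (key * s) s left_start right_start

-- ===== PRECONDITION & SPEC =====
-- Pre_ excludes inputs whose bounds could drive the probed index outside the list, where A
-- raises IndexError; being closed-form it conservatively also excludes a few out-of-range-bound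
-- inputs on which A happens to hit the key early and return (see cites).
def Pre_binary_search_bitonic_py (nums : List Int) (key : Int) (left_start : Int) (right_start : Int) (ascending : Bool) : Prop :=
  right_start < left_start ∨ (-(nums.length : Int) ≤ left_start ∧ right_start < nums.length)
instance (nums : List Int) (key : Int) (left_start : Int) (right_start : Int) (ascending : Bool) : Decidable (Pre_binary_search_bitonic_py nums key left_start right_start ascending) := by unfold Pre_binary_search_bitonic_py; infer_instance

def pvWitness_binary_search_bitonic_py : List Int × Int × Int × Int × Bool := ([1, 3, 5, 7], 5, 0, 3, true)

def Spec_binary_search_bitonic_py (nums : List Int) (key : Int) (left_start : Int) (right_start : Int) (ascending : Bool) (out : Int) : Prop := out = binary_search_bitonic_py_alt nums key left_start right_start ascending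
instance (nums : List Int) (key : Int) (left_start : Int) (right_start : Int) (ascending : Bool) (out : Int) : Decidable (Spec_binary_search_bitonic_py nums key left_start right_start ascending out) := by unfold Spec_binary_search_bitonic_py; infer_instance

-- ===== CLAIM (what is proved, stated in full; the proofs are below) =====
def Claim_equal_binary_search_bitonic_py : Prop := ∀ (nums : List Int) (key : Int) (left_start : Int) (right_start : Int) (ascending : Bool), Dom_binary_search_bitonic_py nums key left_start right_start ascending → Pre_binary_search_bitonic_py nums key left_start right_start ascending → Spec_binary_search_bitonic_py nums key left_start right_start ascending (binary_search_bitonic_py nums key left_start right_start ascending)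

-- ===== LEMMAS AND PROOFS =====

-- Main invariant: with bounds inside [-n, n), one A-loop step equals one B-recursion step.
theorem bsLoopA_eq_bsRecB (nums : List Int) (key : Int) (ascending : Bool)
    (left right : Int)
    (hl : -(nums.length : Int) ≤ left) (hr : right < nums.length) :
    bsLoopA nums key ascending left right
      = bsRecB nums (key * (if ascending then 1 else -1)) (if ascending then 1 else -1) left right := by
  rw [bsLoopA.eq_def, bsRecB.eq_def]
  by_cases hlr : left ≤ right
  · simp only [dif_pos hlr, dif_neg (by omega : ¬ left > right)]
    have hmid := pvMidBounds left right hlr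
    set mid := PySem.Int.floordiv (left + right) 2 with hmiddef
    have hsome : PySem.List.pyGet? nums mid ≠ none := by
      intro hn
      rw [PySem.List.pyGet?_eq_none_iff] at hn
      exact hn (by simp only [PySem.Raise.InRange]; omega)
    match hv : PySem.List.pyGet? nums mid with
    | none => exact absurd hv hsome
    | some v =>
      cases ascending with
      | true =>
        simp only [if_true, mul_one]
        by_cases hve : v = key
        · simp [hve]
        · rw [if_neg hve, if_neg hve]
          by_cases hk : key > v
          · rw [if_pos hk, if_pos hk]
            have h := bsLoopA_eq_bsRecB nums key true (mid + 1) right (by omega) hr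
            rw [show (if true = true then (1:Int) else -1) = 1 from rfl, mul_one] at h
            exact h
          · rw [if_neg hk, if_neg hk]
            have h := bsLoopA_eq_bsRecB nums key true left (mid - 1) hl (by omega)
            rw [show (if true = true then (1:Int) else -1) = 1 from rfl, mul_one] at h
            exact h
      | false =>
        simp only [Bool.false_eq_true, if_false]
        by_cases hve : v = key
        · have hve' : v * -1 = key * -1 := by omega
          simp only [if_pos hve, if_pos hve']
        · have h1 : ¬ (v * -1 = key * -1) := by omega
          by_cases hk : key > v
          · have h2 : ¬ (key * -1 > v * -1) := by omega
            simp only [if_neg hve, if_pos hk, if_neg h1, if_neg h2]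
            have h := bsLoopA_eq_bsRecB nums key false left (mid - 1) hl (by omega)
            rw [show (if false = true then (1:Int) else -1) = -1 from rfl] at h
            exact h
          · have h2 : key * -1 > v * -1 := by omega
            simp only [if_neg hve, if_neg hk, if_neg h1, if_pos h2]
            have h := bsLoopA_eq_bsRecB nums key false (mid + 1) right (by omega) hr
            rw [show (if false = true then (1:Int) else -1) = -1 from rfl] at h
            exact h
  · simp [dif_neg hlr, dif_pos (by omega : left > right)]
termination_by (right - left + 1).toNat
decreasing_by
  all_goals (have := pvMidBounds left right hlr; omega)

-- Empty range: both return -1 whatever the bounds are.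
theorem bsLoopA_empty (nums : List Int) (key : Int) (ascending : Bool)
    (left right : Int) (h : right < left) :
    bsLoopA nums key ascending left right = -1 := by
  rw [bsLoopA.eq_def]; simp [dif_neg (by omega : ¬ left ≤ right)]

theorem bsRecB_empty (nums : List Int) (t s : Int) (lo hi : Int) (h : hi < lo) :
    bsRecB nums t s lo hi = -1 := by
  rw [bsRecB.eq_def]; simp [dif_pos (by omega : lo > hi)]

-- ===== VERDICT (by name: the statement is the Claim_ definition above) =====
theorem binary_search_bitonic_py_spec : Claim_equal_binary_search_bitonic_py := by
  intro nums key left_start right_start ascending _ hpre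
  unfold Spec_binary_search_bitonic_py binary_search_bitonic_py binary_search_bitonic_py_alt
  rcases hpre with h | ⟨hl, hr⟩
  · simp only [bsLoopA_empty nums key ascending _ _ h, bsRecB_empty nums _ _ _ _ h]
  · exact bsLoopA_eq_bsRecB nums key ascending left_start right_start hl hr
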